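-- pv_equiv track=rewrite | github.com/Clube-do-Enrolado/Compiladores | Lexical/afds.py | afd_string
-- ===== SOURCE A (Python) =====
-- def afd_string(lexem):
--     """Função que verifica se o lexema é uma string
--
--     Função que utiliza um AFD (ou DFA) para avaliar a corretude
--     da sintaxe de um lexema concorrente à string, seguindo a
--     regex: {"([ \s-! ]*[ #-$ ]*[ &-\[ ]*[ \]-~ ]*)*"}.
--
--     Parameter:
--     ----------
--     lexem (string): O lexema a ser analisado pelo AFD.
--
--     Return:
--     (boolean, string): Retorna uma tupla informando se
--     o lexema foi reconhecido e qual o tipo do lexema.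
--
--     """
--
--     transition_table = {
--             0: {'"': 1},
--             1: {'"': 2},
--             2: {}
--             }
--
--     # Adições de caracteres ASCII na tabela
--     # de transição.
--     transition_table[1][chr(32)] = 1 # \s
--     transition_table[1][chr(33)] = 1 # !
--     transition_table[1][chr(35)] = 1 # #
--     transition_table[1][chr(36)] = 1 # $
--
--     for i in range(38, 92):          # & até [
--         transition_table[1][chr(i)] = 1
--
--     for i in range(93, 127):         # ] até ~
--         transition_table[1][chr(i)] = 1
--
--     current_state = 0
--     ESTADOS_FINAIS = [2] # Estados finais possíveis
--
--     for char in lexem: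
--         # Se o caractere lido não for válido entre as opções dadas
--         if char not in transition_table[current_state].keys():
--             # O lexema não é válido.
--             return (False,None)
--
--         else: # Muda de estado.
--             current_state = transition_table[current_state][char]
--
--     # Está no estado final e não existem mais caracteres para leitura.
--     if current_state in ESTADOS_FINAIS:
--         return (True,"STRING")
--     else:
--         return (False,None)
-- ===== SOURCE B (Python) =====
-- # B: replaces the DFA transition table and state stepping by a boundary check
-- # plus a membership test of the interior characters in a precomputed set (simpler).
--
-- VALID = ({chr(32), chr(33), chr(35), chr(36)}
--          | {chr(i) for i in range(38, 92)}
--          | {chr(i) for i in range(93, 127)})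
--
--
-- def afd_string(lexem):
--     cs = lexem
--     if (len(cs) >= 2 and cs[0] == '"' and cs[-1] == '"'
--             and all(c in VALID for c in cs[1:-1])):
--         return (True, "STRING")
--     return (False, None)
-- ===== Notes on version B (the rewrite author's own statement) =====
-- stated objective: simpler
-- what changed: Replaced the explicit DFA transition table and state-stepping loop by a direct boundary check (first/last char are '"') plus a membership test of the interior characters in a precomputed valid-character set.
import Mathlib
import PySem

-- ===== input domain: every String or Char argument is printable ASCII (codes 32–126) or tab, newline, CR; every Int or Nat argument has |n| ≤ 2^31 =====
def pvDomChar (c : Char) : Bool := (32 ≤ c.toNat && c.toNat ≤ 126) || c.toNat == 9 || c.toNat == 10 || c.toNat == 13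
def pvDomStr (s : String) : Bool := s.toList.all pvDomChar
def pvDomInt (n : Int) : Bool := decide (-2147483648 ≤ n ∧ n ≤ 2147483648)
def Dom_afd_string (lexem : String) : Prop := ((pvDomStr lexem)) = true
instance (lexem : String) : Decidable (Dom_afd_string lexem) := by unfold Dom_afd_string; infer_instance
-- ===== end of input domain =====

set_option maxRecDepth 40000


-- B replaces A's DFA transition table and state stepping by a boundary check
-- plus an interior membership test in a precomputed set (objective: simpler).

-- ===== PORT A =====
-- the transition table A builds (dict of dicts, with the two chr-insertion loops)
def afdTable : PySem.Dict Int (PySem.Dict Char Int) :=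
  let t : PySem.Dict Int (PySem.Dict Char Int) :=
    PySem.Dict.ofList
      [(0, PySem.Dict.ofList [('"', 1)]),
       (1, PySem.Dict.ofList [('"', 2)]),
       (2, PySem.Dict.ofList [])]
  let t := t.modify 1 (PySem.Dict.ofList []) (fun d => d.insert (Char.ofNat 32) 1)
  let t := t.modify 1 (PySem.Dict.ofList []) (fun d => d.insert (Char.ofNat 33) 1)
  let t := t.modify 1 (PySem.Dict.ofList []) (fun d => d.insert (Char.ofNat 35) 1)
  let t := t.modify 1 (PySem.Dict.ofList []) (fun d => d.insert (Char.ofNat 36) 1)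
  let t := (PySem.List.pyRange 38 92 1).foldl
    (fun t i => t.modify 1 (PySem.Dict.ofList []) (fun d => d.insert (Char.ofNat i.toNat) 1)) t
  let t := (PySem.List.pyRange 93 127 1).foldl
    (fun t i => t.modify 1 (PySem.Dict.ofList []) (fun d => d.insert (Char.ofNat i.toNat) 1)) t
  t

-- the 'for char in lexem' loop with its early 'return (False, None)'
def afdLoop (cs : List Char) (currentState : Int) : Option Int :=
  match cs with
  | [] => some currentState
  | c :: rest =>
    match ((afdTable.getD currentState (PySem.Dict.ofList [])).get? c) with
    | none => none
    | some s' => afdLoop rest s'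

def afd_string (lexem : String) : Bool × Option String :=
  match afdLoop lexem.toList 0 with
  | none => (false, none)
  | some s => if [(2 : Int)].contains s then (true, some "STRING") else (false, none)

-- ===== PORT B =====
def VALID : PySem.Set Char :=
  PySem.Set.union
    (PySem.Set.union
      (PySem.Set.ofList [Char.ofNat 32, Char.ofNat 33, Char.ofNat 35, Char.ofNat 36])
      (PySem.Set.ofList ((PySem.List.pyRange 38 92 1).map (fun i => Char.ofNat i.toNat))))
    (PySem.Set.ofList ((PySem.List.pyRange 93 127 1).map (fun i => Char.ofNat i.toNat)))

def afd_string_alt (lexem : String) : Bool × Option String :=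
  let cs := lexem.toList
  if decide (2 ≤ cs.length)
      && (PySem.List.pyGet? cs 0 == some '"')
      && (PySem.List.pyGet? cs (-1) == some '"')
      && (PySem.List.slice cs (some 1) (some (-1))).all (fun c => PySem.Set.contains VALID c)
  then (true, some "STRING")
  else (false, none)

-- ===== PRECONDITION & SPEC =====
def Spec_afd_string (lexem : String) (out : Bool × Option String) : Prop := out = afd_string_alt lexem
instance (lexem : String) (out : Bool × Option String) : Decidable (Spec_afd_string lexem out) := by unfold Spec_afd_string; infer_instance

-- ===== CLAIM (what is proved, stated in full; the proofs are below) =====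
def Claim_equal_afd_string : Prop := ∀ (lexem : String), Dom_afd_string lexem → Spec_afd_string lexem (afd_string lexem)

-- ===== LEMMAS AND PROOFS =====

-- A's finalization of the loop result
def afdFin (o : Option Int) : Bool × Option String :=
  match o with
  | none => (false, none)
  | some s => if [(2 : Int)].contains s then (true, some "STRING") else (false, none)

theorem afdFin_eq (lexem : String) : afd_string lexem = afdFin (afdLoop lexem.toList 0) := rfl

-- the table's row for state 1, computed out: '"' ↦ 2 first, then the VALID chars ↦ 1
theorem table_row1 :
    afdTable.getD 1 (PySem.Dict.ofList []) =
      PySem.Dict.mk (('"', 2) :: VALID.map (fun c => (c, 1))) := by decide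

theorem table_row0 :
    afdTable.getD 0 (PySem.Dict.ofList []) = PySem.Dict.mk [('"', 1)] := by decide

theorem table_row2 :
    afdTable.getD 2 (PySem.Dict.ofList []) = PySem.Dict.mk [] := by decide

theorem quote_not_valid : PySem.Set.contains VALID '"' = false := by decide

-- lookup in a constant-valued literal dict is list membership
theorem get?_mk_map_const {κ ν : Type} [BEq κ] [LawfulBEq κ] (l : List κ) (v : ν) (x : κ) :
    (PySem.Dict.mk (l.map (fun c => (c, v)))).get? x =
      if x ∈ l then some v else none := by
  induction l with
  | nil => simp [PySem.Dict.get?]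
  | cons a t ih =>
    rw [List.map_cons, PySem.Dict.get?_mk_cons, ih]
    by_cases h : a = x
    · subst h; simp
    · simp [h, Ne.symm h]

-- one step of A's DFA from state 1
theorem step1 (c : Char) :
    (afdTable.getD 1 (PySem.Dict.ofList [])).get? c =
      if c = '"' then some 2
      else if PySem.Set.contains VALID c then some 1 else none := by
  rw [table_row1, PySem.Dict.get?_mk_cons, get?_mk_map_const]
  by_cases h : c = '"'
  · subst h; simp
  · have hb : ¬ (('"' == c) = true) := by simp [Ne.symm h]
    rw [if_neg hb, if_neg h]
    simp [PySem.Set.contains]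

-- from state 2 nothing further is accepted
theorem loop2 (cs : List Char) :
    afdFin (afdLoop cs 2) = if cs.isEmpty then (true, some "STRING") else (false, none) := by
  cases cs with
  | nil => rfl
  | cons c rest =>
    rw [afdLoop, table_row2]
    rfl

-- from state 1: accepted iff cs ends in '"' and all earlier chars are in VALID
theorem loop1 (cs : List Char) :
    afdFin (afdLoop cs 1) =
      if (cs.getLast? == some '"') && cs.dropLast.all (fun c => PySem.Set.contains VALID c)
      then (true, some "STRING") else (false, none) := by
  induction cs with
  | nil => rfl
  | cons c rest ih =>
    rw [afdLoop, step1]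
    by_cases hq : c = '"'
    · subst hq
      rw [if_pos rfl]
      show afdFin (afdLoop rest 2) = _
      rw [loop2]
      cases rest with
      | nil => rfl
      | cons d t =>
        have hd : ('"' :: d :: t).dropLast = '"' :: (d :: t).dropLast := rfl
        rw [hd]
        have quo : ('"' : Char) ∉ VALID := by simpa using quote_not_valid
        simp only [List.getLast?_cons_cons, List.isEmpty_cons]
        simp
        exact fun _ h => absurd h quo
    · rw [if_neg hq]
      have hbq : (some c == some '"') = false := by simp [hq]
      by_cases hv : PySem.Set.contains VALID c = true
      · rw [if_pos hv]
        show afdFin (afdLoop rest 1) = _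
        rw [ih]
        cases rest with
        | nil =>
          have g1 : ([c].getLast? : Option Char) = some c := rfl
          have g2 : [c].dropLast = ([] : List Char) := rfl
          rw [g1, g2, hbq]
          rfl
        | cons d t =>
          have hd : (c :: d :: t).dropLast = c :: (d :: t).dropLast := rfl
          rw [hd, List.getLast?_cons_cons]
          have hm : c ∈ VALID := by simpa using hv
          simp [hm]
      · rw [if_neg hv]
        show afdFin none = _
        have hv' : PySem.Set.contains VALID c = false := by simpa using hv
        cases rest with
        | nil =>
          have g1 : ([c].getLast? : Option Char) = some c := rfl
          rw [g1, hbq]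
          rfl
        | cons d t =>
          have hd : (c :: d :: t).dropLast = c :: (d :: t).dropLast := rfl
          rw [hd, List.getLast?_cons_cons]
          have hm' : c ∉ VALID := by simpa using hv
          simp [afdFin]
          exact fun _ h => absurd h hm'

-- B's interior slice xs[1:-1] of a cons is rest.dropLast
theorem slice_one_neg_one (c : Char) (rest : List Char) :
    PySem.List.slice (c :: rest) (some 1) (some (-1)) = rest.dropLast := by
  simp [PySem.List.slice, List.dropLast_eq_take]

-- ===== VERDICT (by name: the statement is the Claim_ definition above) =====
theorem afd_string_spec : Claim_equal_afd_string := by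
  intro lexem _
  show afd_string lexem = afd_string_alt lexem
  rw [afdFin_eq]
  simp only [afd_string_alt]
  cases hcs : lexem.toList with
  | nil => rfl
  | cons c rest =>
    rw [afdLoop, table_row0, PySem.Dict.get?_mk_cons]
    by_cases hq : c = '"'
    · subst hq
      show afdFin (afdLoop rest 1) = _
      rw [loop1, slice_one_neg_one, PySem.List.pyGet?_neg_one, PySem.List.pyGet?_zero]
      cases rest with
      | nil => rfl
      | cons d t =>
        simp
    · have hb : ('"' == c) = false := beq_eq_false_iff_ne.mpr (fun e => hq e.symm)
      rw [hb]
      show ((false, none) : Bool × Option String) = _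
      rw [PySem.List.pyGet?_zero]
      have hbq : ((some c : Option Char) == some '"') = false := by simp [hq]
      simp [hbq]
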